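-- pv_equiv track=rewrite | github.com/marcndo/algo_ds_playground | problems/two_pointers/swap_vowels.py | swap_vowels
-- ===== SOURCE A (Python) =====
-- def swap_vowels(s):
--     s = list(s)
--     i = 0
--     j = len(s) - 1
--     vowels = "aeiou"
--     while i < j and s[i] not in vowels:
--         i += 1
--     while i < j and s[j] not in vowels:
--         j -= 1
--     s[i], s[j] = s[j], s[i]
--     i += 1
--     j -= 1
--     return "".join(s)
-- ===== SOURCE B (Python) =====
-- def swap_vowels(s):
--     chars = list(s)
--     idx = [k for k, c in enumerate(chars) if c in "aeiou"]
--     if idx: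
--         chars[idx[0]], chars[idx[-1]] = chars[idx[-1]], chars[idx[0]]
--     return "".join(chars)
-- ===== Notes on version B (the rewrite author's own statement) =====
-- stated objective: simpler
-- what changed: One comprehension collects all vowel indices and the swap uses its first and last element, replacing the two sentinel-walking while loops over converging pointers.
-- crash fix: On the empty string A raises IndexError (it unconditionally indexes s[0]); B returns ''. — e.g. on swap_vowels(""): A raises IndexError, B returns ""
import Mathlib
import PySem

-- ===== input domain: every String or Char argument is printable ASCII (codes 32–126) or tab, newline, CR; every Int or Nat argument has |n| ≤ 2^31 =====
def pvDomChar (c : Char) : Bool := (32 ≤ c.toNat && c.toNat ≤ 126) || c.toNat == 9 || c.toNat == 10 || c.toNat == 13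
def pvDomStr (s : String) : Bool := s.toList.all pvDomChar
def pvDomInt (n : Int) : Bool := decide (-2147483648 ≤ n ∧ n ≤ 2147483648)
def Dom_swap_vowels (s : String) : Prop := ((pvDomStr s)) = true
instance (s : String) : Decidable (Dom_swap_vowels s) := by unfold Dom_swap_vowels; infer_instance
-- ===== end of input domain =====

-- B replaces A's two sentinel-walking while loops by one comprehension collecting all
-- vowel indices and swapping its first and last element (objective: simpler).


-- ===== PORT A =====
-- vowels = "aeiou" (membership of a single char in this string)
def pvVowels : List Char := ['a', 'e', 'i', 'o', 'u']

-- while i < j and s[i] not in vowels: i += 1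
-- (whenever the body indexes, 0 ≤ i < j < len cs, so the total pyGetD is exact there)
def swapVowelsLoop1 (cs : List Char) (j : Int) (i : Int) : Int :=
  if _h : i < j then
    if PySem.List.pyGetD cs i ' ' ∈ pvVowels then i
    else swapVowelsLoop1 cs j (i + 1)
  else i
termination_by (j - i).toNat
decreasing_by omega

-- while i < j and s[j] not in vowels: j -= 1
def swapVowelsLoop2 (cs : List Char) (i : Int) (j : Int) : Int :=
  if _h : i < j then
    if PySem.List.pyGetD cs j ' ' ∈ pvVowels then j
    else swapVowelsLoop2 cs i (j - 1)
  else j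
termination_by (j - i).toNat
decreasing_by omega

-- On the empty string Python raises IndexError at s[i]; that input is excluded by
-- Pre_swap_vowels, so the total pyGetD/pySetD forms are exact on all admitted inputs.
def swap_vowels (s : String) : String :=
  let cs := s.toList
  let i := swapVowelsLoop1 cs (PySem.List.len cs - 1) 0
  let j := swapVowelsLoop2 cs i (PySem.List.len cs - 1)
  -- s[i], s[j] = s[j], s[i]
  let ci := PySem.List.pyGetD cs i ' '
  let cj := PySem.List.pyGetD cs j ' '
  String.ofList (PySem.List.pySetD (PySem.List.pySetD cs i cj) j ci)

-- ===== PORT B =====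
-- idx = [k for k, c in enumerate(chars) if c in "aeiou"]
def pvIdx (cs : List Char) : List Int :=
  ((PySem.List.enumerate cs 0).filter (fun p => p.2 ∈ pvVowels)).map Prod.fst

-- if idx: chars[idx[0]], chars[idx[-1]] = chars[idx[-1]], chars[idx[0]]; return "".join(chars)
-- (idx[0] / idx[-1] on the nonempty idx are its head / getLast; both indices are in range,
-- so the total pyGetD/pySetD forms are exact)
def swap_vowels_alt (s : String) : String :=
  let chars := s.toList
  let idx := pvIdx chars
  if h : idx = [] then String.ofList chars
  else
    let k0 := idx.head h          -- idx[0]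
    let kl := idx.getLast h       -- idx[-1]
    String.ofList (PySem.List.pySetD
      (PySem.List.pySetD chars k0 (PySem.List.pyGetD chars kl ' '))
      kl (PySem.List.pyGetD chars k0 ' '))

-- ===== PRECONDITION & SPEC =====
-- Pre_ excludes exactly the empty string: there A raises IndexError (s[0] on an empty list).
def Pre_swap_vowels (s : String) : Prop := s ≠ ""
instance (s : String) : Decidable (Pre_swap_vowels s) := by unfold Pre_swap_vowels; infer_instance
def pvWitness_swap_vowels : String := "hello"

-- On the empty string A raises IndexError (it unconditionally indexes s[0]); B returns ''.
def Raises_swap_vowels (s : String) : Prop := s = ""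
instance (s : String) : Decidable (Raises_swap_vowels s) := by unfold Raises_swap_vowels; infer_instance
def pvRaiseWitness_swap_vowels : String := ""
def pvRaiseWitnessOut_swap_vowels : String := ""

def Spec_swap_vowels (s : String) (out : String) : Prop := out = swap_vowels_alt s
instance (s : String) (out : String) : Decidable (Spec_swap_vowels s out) := by unfold Spec_swap_vowels; infer_instance

-- ===== CLAIM (what is proved, stated in full; the proofs are below) =====
def Claim_equal_swap_vowels : Prop := ∀ (s : String), Dom_swap_vowels s → Pre_swap_vowels s → Spec_swap_vowels s (swap_vowels s)
def Claim_raises_swap_vowels : Prop := (∀ (s : String), Dom_swap_vowels s → Raises_swap_vowels s → ¬ Pre_swap_vowels s) ∧ (Dom_swap_vowels (pvRaiseWitness_swap_vowels) ∧ Raises_swap_vowels (pvRaiseWitness_swap_vowels) ∧ swap_vowels_alt (pvRaiseWitness_swap_vowels) = pvRaiseWitnessOut_swap_vowels)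

-- ===== LEMMAS AND PROOFS =====

-- the vowel test exactly as the ports perform it (the default ' ' is not a vowel)
def pvIsV (cs : List Char) (k : Int) : Prop := PySem.List.pyGetD cs k ' ' ∈ pvVowels

theorem swapVowelsLoop1_spec (cs : List Char) (j : Int) :
    ∀ (m : Nat) (i : Int), (j - i).toNat = m → 0 ≤ i → i ≤ j →
      i ≤ swapVowelsLoop1 cs j i ∧ swapVowelsLoop1 cs j i ≤ j ∧
      (∀ k, i ≤ k → k < swapVowelsLoop1 cs j i → ¬ pvIsV cs k) ∧
      (swapVowelsLoop1 cs j i < j → pvIsV cs (swapVowelsLoop1 cs j i)) := by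
  intro m
  induction m using Nat.strong_induction_on with
  | _ m ih =>
    intro i hm h0 hij
    unfold swapVowelsLoop1
    split_ifs with h1 h2
    · exact ⟨le_refl _, le_of_lt h1, fun k hk1 hk2 => absurd hk1 (by omega), fun _ => h2⟩
    · have hlt : (j - (i + 1)).toNat < m := by omega
      obtain ⟨a1, a2, a3, a4⟩ := ih _ hlt (i + 1) rfl (by omega) (by omega)
      refine ⟨by omega, a2, ?_, a4⟩
      intro k hk1 hk2
      rcases eq_or_lt_of_le hk1 with rfl | hk
      · exact h2
      · exact a3 k (by omega) hk2
    · exact ⟨le_refl _, hij, fun k hk1 hk2 => absurd hk1 (by omega), fun h => absurd h (by omega)⟩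

theorem swapVowelsLoop2_spec (cs : List Char) (i : Int) :
    ∀ (m : Nat) (j : Int), (j - i).toNat = m → i ≤ j →
      i ≤ swapVowelsLoop2 cs i j ∧ swapVowelsLoop2 cs i j ≤ j ∧
      (∀ k, swapVowelsLoop2 cs i j < k → k ≤ j → ¬ pvIsV cs k) ∧
      (i < swapVowelsLoop2 cs i j → pvIsV cs (swapVowelsLoop2 cs i j)) := by
  intro m
  induction m using Nat.strong_induction_on with
  | _ m ih =>
    intro j hm hij
    unfold swapVowelsLoop2
    split_ifs with h1 h2
    · exact ⟨le_of_lt h1, le_refl _, fun k hk1 hk2 => absurd hk1 (by omega), fun _ => h2⟩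
    · have hlt : ((j - 1) - i).toNat < m := by omega
      obtain ⟨a1, a2, a3, a4⟩ := ih _ hlt (j - 1) rfl (by omega)
      refine ⟨a1, by omega, ?_, a4⟩
      intro k hk1 hk2
      rcases eq_or_lt_of_le hk2 with rfl | hk
      · exact h2
      · exact a3 k hk1 (by omega)
    · exact ⟨hij, le_refl _, fun k hk1 hk2 => absurd hk1 (by omega), fun h => absurd h (by omega)⟩

theorem mem_pvIdx (cs : List Char) (m : Int) :
    m ∈ pvIdx cs ↔ 0 ≤ m ∧ m < cs.length ∧ pvIsV cs m := by
  unfold pvIdx pvIsV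
  simp only [List.mem_map, List.mem_filter, PySem.List.mem_enumerate_iff]
  constructor
  · rintro ⟨p, ⟨⟨k, hk, rfl⟩, hc⟩, rfl⟩
    simp only [zero_add]
    refine ⟨Int.natCast_nonneg k, by exact_mod_cast hk, ?_⟩
    rw [PySem.List.pyGetD_ofNat cs k ' ' hk]
    simpa using hc
  · rintro ⟨h0, hlt, hv⟩
    have hk : m.toNat < cs.length := by omega
    refine ⟨(m, cs[m.toNat]), ⟨⟨m.toNat, hk, by rw [zero_add]; congr 1; omega⟩, ?_⟩, rfl⟩
    rw [← PySem.List.pyGetD_eq_getElem cs ' ' h0 (by exact_mod_cast hlt)] at *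
    simpa using hv

theorem pvIdx_pairwise (cs : List Char) : (pvIdx cs).Pairwise (· < ·) := by
  unfold pvIdx
  exact List.Pairwise.map Prod.fst (fun _ _ h => h) ((PySem.List.pairwise_lt_enumerate cs 0).filter _)

theorem head_le_of_pairwise {x : Int} {t : List Int} (hp : (x :: t).Pairwise (· < ·))
    {m : Int} (hm : m ∈ x :: t) : x ≤ m := by
  rcases List.mem_cons.mp hm with rfl | hm'
  · exact le_refl _
  · exact le_of_lt ((List.pairwise_cons.mp hp).1 m hm')

theorem le_getLast_of_pairwise : ∀ {l : List Int}, l.Pairwise (· < ·) →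
    ∀ {m : Int}, m ∈ l → ∀ (h : l ≠ []), m ≤ l.getLast h := by
  intro l
  induction l with
  | nil => intro _ m hm; cases hm
  | cons x t ih =>
    intro hp m hm h
    rcases List.mem_cons.mp hm with rfl | hm'
    · cases t with
      | nil => simp
      | cons y t' =>
        rw [List.getLast_cons (by simp)]
        have hxy : m < y := (List.pairwise_cons.mp hp).1 y (by simp)
        exact le_of_lt (lt_of_lt_of_le hxy
          (ih (List.pairwise_cons.mp hp).2 (by simp) (by simp)))
    · cases t with
      | nil => cases hm'
      | cons y t' =>
        rw [List.getLast_cons (by simp)]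
        exact ih (List.pairwise_cons.mp hp).2 hm' (by simp)

-- ===== VERDICT (by name: the statement is the Claim_ definition above) =====
theorem swap_vowels_spec : Claim_equal_swap_vowels := by
  intro s _ hpre
  unfold Spec_swap_vowels swap_vowels swap_vowels_alt
  have hne : s.toList ≠ [] := by
    intro h; apply hpre; cases s; simp_all
  set cs := s.toList with hcs
  have hn : 0 < cs.length := List.length_pos_iff.mpr hne
  simp only [PySem.List.len_eq]
  obtain ⟨a1, a2, a3, a4⟩ :=
    swapVowelsLoop1_spec cs ((cs.length : Int) - 1) _ 0 rfl (le_refl 0) (by omega)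
  set i := swapVowelsLoop1 cs ((cs.length : Int) - 1) 0 with hi
  obtain ⟨b1, b2, b3, b4⟩ :=
    swapVowelsLoop2_spec cs i _ ((cs.length : Int) - 1) rfl (by omega)
  set j := swapVowelsLoop2 cs i ((cs.length : Int) - 1) with hj
  have hidx := mem_pvIdx cs
  have hpair := pvIdx_pairwise cs
  rcases hIdx : pvIdx cs with _ | ⟨k0, rest⟩
  · -- no vowels: each loop runs to the far end, i = j = len-1, the double swap is the identity
    rw [dif_pos rfl]
    have hnov : ∀ k : Int, ¬ (0 ≤ k ∧ k < cs.length ∧ pvIsV cs k) := by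
      intro k hk; have := (hidx k).mpr hk; rw [hIdx] at this; cases this
    have hieq : i = (cs.length : Int) - 1 := by
      by_contra h
      have hlt : i < (cs.length : Int) - 1 := lt_of_le_of_ne a2 h
      exact hnov i ⟨by omega, by omega, a4 hlt⟩
    have hjeq : j = (cs.length : Int) - 1 := by
      by_contra h
      have hlt : i < j := by omega
      exact hnov j ⟨by omega, by omega, b4 hlt⟩
    rw [hieq, hjeq, show ((cs.length : Int) - 1) = ((cs.length - 1 : Nat) : Int) by omega]
    have hlen : cs.length - 1 < cs.length := by omega
    rw [PySem.List.pyGetD_ofNat cs _ ' ' hlen, PySem.List.pySetD_natCast,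
      PySem.List.pySetD_natCast, List.set_set, List.set_getElem_self]
  · -- at least one vowel: i is the first vowel index (= idx[0]), j the last (= idx[-1])
    have hne' : k0 :: rest ≠ [] := List.cons_ne_nil k0 rest
    rw [dif_neg hne', List.head_cons]
    rw [hIdx] at hidx hpair
    set kl := (k0 :: rest).getLast hne' with hkldef
    have hklmem : kl ∈ k0 :: rest := List.getLast_mem hne'
    obtain ⟨hkl0, hkln, hklv⟩ := (hidx kl).mp hklmem
    obtain ⟨hk00, hk0n, hk0v⟩ := (hidx k0).mp (by simp)
    have hk0kl : k0 ≤ kl := head_le_of_pairwise hpair hklmem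
    have hieq : i = k0 := by
      have h1 : i ≤ k0 := by
        by_contra h
        exact a3 k0 hk00 (by omega) hk0v
      rcases eq_or_lt_of_le h1 with h | h
      · exact h
      · exfalso
        have hiv : pvIsV cs i := a4 (by omega)
        have hmem : i ∈ k0 :: rest := (hidx i).mpr ⟨a1, by omega, hiv⟩
        have := head_le_of_pairwise hpair hmem
        omega
    have hjeq : j = kl := by
      have h1 : kl ≤ j := by
        by_contra h
        exact b3 kl (by omega) (by omega) hklv
      rcases eq_or_lt_of_le h1 with h | h
      · exact h.symm
      · exfalso
        have hjv : pvIsV cs j := b4 (by omega)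
        have hmem : j ∈ k0 :: rest := (hidx j).mpr ⟨by omega, by omega, hjv⟩
        have := le_getLast_of_pairwise hpair hmem hne'
        omega
    rw [hieq, hjeq]

@[simp] theorem swap_vowels_raises : Claim_raises_swap_vowels := by
  unfold Claim_raises_swap_vowels
  refine ⟨fun s _ h => ?_, by decide⟩
  intro hp; exact hp h
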